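-- pv_equiv track=rewrite | github.com/rajarshi008/Scarlet | LTLClassifier.py | word2trace
-- ===== SOURCE A (Python) =====
-- def word2trace(word, alphabet):
-- 	'''
-- 	Converts word object to trace object
-- 	'''
-- 	one_hot_alphabet={}
-- 	for i in range(len(alphabet)):
-- 		one_hot_letter = [0]*len(alphabet)
-- 		letter = alphabet[i]
-- 		one_hot_letter[i] = 1
-- 		one_hot_alphabet[letter] = tuple(one_hot_letter)
-- 	trace_list=[]
-- 	for letter in word:
-- 		trace_list.append(one_hot_alphabet[letter])
--
-- 	return trace_list
-- ===== SOURCE B (Python) =====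
-- def word2trace(word, alphabet):
-- 	'''
-- 	Converts word object to trace object
-- 	'''
-- 	index = {}
-- 	for i, letter in enumerate(alphabet):
-- 		index[letter] = i
-- 	n = len(alphabet)
-- 	trace_list = []
-- 	for letter in word:
-- 		i = index[letter]
-- 		trace_list.append(tuple(1 if j == i else 0 for j in range(n)))
-- 	return trace_list
-- ===== Notes on version B (the rewrite author's own statement) =====
-- stated objective: simpler
-- what changed: B keeps only an integer position per letter (last-wins index map) and materialises each one-hot tuple on the fly during the word pass, instead of pre-building a dict of full-width tuples over the alphabet.
import Mathlib
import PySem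

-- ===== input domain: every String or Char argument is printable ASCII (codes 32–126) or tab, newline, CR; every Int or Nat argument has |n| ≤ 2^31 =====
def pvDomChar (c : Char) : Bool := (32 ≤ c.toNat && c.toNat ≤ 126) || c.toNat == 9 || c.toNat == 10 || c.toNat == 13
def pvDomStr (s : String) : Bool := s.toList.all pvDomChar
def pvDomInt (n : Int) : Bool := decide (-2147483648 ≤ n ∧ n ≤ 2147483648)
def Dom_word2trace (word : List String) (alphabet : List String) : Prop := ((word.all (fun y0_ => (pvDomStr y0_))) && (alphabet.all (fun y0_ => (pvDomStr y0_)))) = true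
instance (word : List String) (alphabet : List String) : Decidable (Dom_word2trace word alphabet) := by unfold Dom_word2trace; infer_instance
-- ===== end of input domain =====

-- B pre-computes only an index per letter and builds each one-hot row during the word pass (objective: simpler).
-- Pre_ excludes exactly the inputs where Python A raises KeyError (a word letter absent from the alphabet).

-- ===== PORT A =====
def word2trace (word : List String) (alphabet : List String) : List (List Int) :=
  let one_hot_alphabet : PySem.Dict String (List Int) :=
    (PySem.List.pyRange 0 (alphabet.length : Int) 1).foldl (fun d i =>
      let one_hot_letter := List.replicate alphabet.length (0 : Int)
      let letter := PySem.List.pyGetD alphabet i ""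
      let one_hot_letter := one_hot_letter.set i.toNat 1
      d.insert letter one_hot_letter) PySem.Dict.empty
  word.foldl (fun trace_list letter =>
    trace_list ++ [(one_hot_alphabet.get? letter).getD []]) []

-- ===== PORT B =====
def word2trace_alt (word : List String) (alphabet : List String) : List (List Int) :=
  let index : PySem.Dict String Int :=
    (PySem.List.enumerate alphabet 0).foldl (fun d p => d.insert p.2 p.1) PySem.Dict.empty
  let n := alphabet.length
  word.foldl (fun trace_list letter =>
    let i := (index.get? letter).getD (-1)
    trace_list ++ [(PySem.List.pyRange 0 (n : Int) 1).map (fun j => if j = i then (1 : Int) else 0)]) []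

-- ===== PRECONDITION & SPEC =====
-- Pre_ excludes exactly the inputs on which A raises KeyError: a letter of word not in alphabet.
def Pre_word2trace (word : List String) (alphabet : List String) : Prop :=
  ∀ l ∈ word, l ∈ alphabet
instance (word : List String) (alphabet : List String) : Decidable (Pre_word2trace word alphabet) := by unfold Pre_word2trace; infer_instance
def pvWitness_word2trace : List String × List String := (["a", "b", "a"], ["a", "b", "c"])

def Spec_word2trace (word : List String) (alphabet : List String) (out : List (List Int)) : Prop := out = word2trace_alt word alphabet
instance (word : List String) (alphabet : List String) (out : List (List Int)) : Decidable (Spec_word2trace word alphabet out) := by unfold Spec_word2trace; infer_instance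

-- ===== CLAIM (what is proved, stated in full; the proofs are below) =====
def Claim_equal_word2trace : Prop := ∀ (word : List String) (alphabet : List String), Dom_word2trace word alphabet → Pre_word2trace word alphabet → Spec_word2trace word alphabet (word2trace word alphabet)

-- ===== LEMMAS AND PROOFS =====

lemma onehot_eq (n k : Nat) :
    (List.replicate n (0 : Int)).set k 1
      = (PySem.List.pyRange 0 (n : Int) 1).map (fun j => if j = (k : Int) then (1 : Int) else 0) := by
  rw [PySem.List.pyRange_zero_nat]
  apply List.ext_getElem
  · simp
  · intro i h1 h2
    simp only [List.getElem_set, List.getElem_map, List.getElem_range, List.getElem_replicate] at *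
    simp at h1
    by_cases hik : k = i <;> simp [hik]
    omega

lemma rel_fold (n : Nat) (alphabet : List String) (L : List Int)
    (hL : ∀ i ∈ L, 0 ≤ i)
    (dA : PySem.Dict String (List Int)) (dB : PySem.Dict String Int)
    (hrel : ∀ l, dA.get? l = (dB.get? l).map
      (fun i => (PySem.List.pyRange 0 (n : Int) 1).map (fun j => if j = i then (1 : Int) else 0)))
    (l : String) :
    ((L.foldl (fun d i => d.insert (PySem.List.pyGetD alphabet i "")
        ((List.replicate n (0 : Int)).set i.toNat 1)) dA).get? l)
      = ((L.foldl (fun d i => d.insert (PySem.List.pyGetD alphabet i "") i) dB).get? l).map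
          (fun i => (PySem.List.pyRange 0 (n : Int) 1).map (fun j => if j = i then (1 : Int) else 0)) := by
  induction L generalizing dA dB with
  | nil => exact hrel l
  | cons i L ih =>
      simp only [List.foldl_cons]
      apply ih (fun x hx => hL x (by simp [hx]))
      intro l'
      rw [PySem.Dict.get?_insert, PySem.Dict.get?_insert]
      split_ifs with h
      · simp [onehot_eq n i.toNat, Int.toNat_of_nonneg (hL i (by simp))]
      · exact hrel l'

lemma dicts_rel (alphabet : List String) (l : String) :
    (((PySem.List.pyRange 0 (alphabet.length : Int) 1).foldl (fun d i =>
        d.insert (PySem.List.pyGetD alphabet i "")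
          ((List.replicate alphabet.length (0 : Int)).set i.toNat 1)) PySem.Dict.empty).get? l)
      = (((PySem.List.enumerate alphabet 0).foldl (fun d p => d.insert p.2 p.1) PySem.Dict.empty).get? l).map
          (fun i => (PySem.List.pyRange 0 (alphabet.length : Int) 1).map (fun j => if j = i then (1 : Int) else 0)) := by
  rw [PySem.List.enumerate_eq_map_pyRange (d := ""), List.foldl_map]
  simp only [PySem.List.len_eq]
  apply rel_fold
  · intro i hi
    exact ((PySem.List.mem_pyRange_one).1 hi).1
  · intro l'
    simp [PySem.Dict.get?_empty]

lemma index_contains (alphabet : List String) (l : String) (hl : l ∈ alphabet) :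
    (((PySem.List.enumerate alphabet 0).foldl (fun d p => d.insert p.2 p.1) PySem.Dict.empty).get? l).isSome := by
  rw [Option.isSome_iff_ne_none]
  rw [Ne, PySem.Dict.get?_eq_none_iff_not_mem_keys]
  rw [PySem.Dict.keys_foldl_insert_key (PySem.List.enumerate alphabet 0) (fun p => p.2) (fun _ p => p.1) PySem.Dict.empty]
  simp [PySem.List.map_snd_enumerate, PySem.Set.update_nil_left, PySem.Set.mem_ofList, hl,
    PySem.Dict.keys_empty]

-- ===== VERDICT (by name: the statement is the Claim_ definition above) =====
theorem word2trace_spec : Claim_equal_word2trace := by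
  intro word alphabet _ hpre
  unfold Spec_word2trace word2trace word2trace_alt
  simp only [PySem.List.foldl_append_singleton_eq_map, List.nil_append]
  apply List.map_congr_left
  intro letter hmem
  rw [dicts_rel]
  obtain ⟨i, hi⟩ := Option.isSome_iff_exists.1 (index_contains alphabet letter (hpre letter hmem))
  simp [hi]
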